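-- pv_equiv track=rewrite | github.com/geekmaker93/FastApi | app/routes/ai_cloud.py | _sanitize_answer_text
-- ===== SOURCE A (Python) =====
-- def _sanitize_answer_text(answer: str) -> str:
--     text = (answer or "").strip()
--     if not text:
--         return ""
--
--     forbidden_prefixes = (
--         "sources:",
--         "top sources:",
--         "retrieved context",
--         "docs considered",
--         "missing data:",
--     )
--
--     kept_lines = []
--     skip_precision_block = False
--     for line in text.splitlines():
--         normalized = line.strip().lower()
--         if normalized.startswith("to make this recommendation more precise, confirm:"):
--             skip_precision_block = True
--             continue
--         if skip_precision_block:
--             if normalized.startswith("-") or not normalized: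
--                 continue
--             skip_precision_block = False
--         if any(normalized.startswith(prefix) for prefix in forbidden_prefixes):
--             continue
--         kept_lines.append(line)
--
--     return "\n".join(kept_lines).strip()
-- ===== SOURCE B (Python) =====
-- def _sanitize_answer_text(answer: str) -> str:
--     text = (answer or "").strip()
--     if not text:
--         return ""
--
--     forbidden_prefixes = (
--         "sources:",
--         "top sources:",
--         "retrieved context",
--         "docs considered",
--         "missing data:",
--     )
--
--     lines = text.splitlines()
--     kept_lines = []
--     i = 0
--     n = len(lines)
--     while i < n:
--         normalized = lines[i].strip().lower()
--         if normalized.startswith("to make this recommendation more precise, confirm:"):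
--             # consume the precision block: following empty or '-'-bulleted lines
--             i += 1
--             while i < n:
--                 nrm = lines[i].strip().lower()
--                 if nrm.startswith("-") or not nrm:
--                     i += 1
--                 else:
--                     break
--             continue  # the terminating line is reprocessed normally
--         if not any(normalized.startswith(p) for p in forbidden_prefixes):
--             kept_lines.append(lines[i])
--         i += 1
--
--     return "\n".join(kept_lines).strip()
-- ===== Notes on version B (the rewrite author's own statement) =====
-- stated objective: alternative
-- what changed: Replaced the carried skip_precision_block boolean state with an index-driven outer while loop plus a nested inner loop that consumes the precision block lines and breaks on the terminating line, which is then reprocessed by the outer loop.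
import Mathlib
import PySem

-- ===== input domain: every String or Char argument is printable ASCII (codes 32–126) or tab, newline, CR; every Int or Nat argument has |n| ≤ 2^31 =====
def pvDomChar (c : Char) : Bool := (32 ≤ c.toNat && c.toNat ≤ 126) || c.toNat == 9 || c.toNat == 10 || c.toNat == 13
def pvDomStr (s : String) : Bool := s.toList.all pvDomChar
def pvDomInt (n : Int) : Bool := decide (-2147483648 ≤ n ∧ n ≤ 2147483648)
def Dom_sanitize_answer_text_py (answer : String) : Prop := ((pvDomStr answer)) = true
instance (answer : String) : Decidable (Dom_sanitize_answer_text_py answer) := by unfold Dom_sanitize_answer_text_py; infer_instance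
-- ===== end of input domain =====

-- B replaces A's carried skip-flag single pass by an index/recursion walk with a nested
-- block-consuming inner loop (objective: alternative decomposition, same cost).

-- shared per-line tests (both Pythons compute normalized = line.strip().lower() and these prefixes)
def pvNorm (line : String) : String := PySem.Str.lower (PySem.Str.strip line)

def pvIsHdr (line : String) : Bool :=
  PySem.Str.startswith (pvNorm line) "to make this recommendation more precise, confirm:"

def pvIsBlock (line : String) : Bool :=
  PySem.Str.startswith (pvNorm line) "-" || PySem.Str.len (pvNorm line) == 0

def pvForbidden : List String :=
  ["sources:", "top sources:", "retrieved context", "docs considered", "missing data:"]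

def pvIsForbidden (line : String) : Bool :=
  pvForbidden.any (fun p => PySem.Str.startswith (pvNorm line) p)

-- ===== PORT A =====
-- the body of A's for-loop over the state (kept_lines, skip_precision_block)
def pvStepA (st : List String × Bool) (line : String) : List String × Bool :=
  if pvIsHdr line then (st.1, true)
  else if st.2 && pvIsBlock line then (st.1, true)
  else if pvIsForbidden line then (st.1, false)
  else (st.1 ++ [line], false)

def sanitize_answer_text_py (answer : String) : String :=
  let text := PySem.Str.strip answer
  if PySem.Str.len text == 0 then ""
  else
    let kept := ((PySem.Str.splitlines text).foldl pvStepA ([], false)).1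
    PySem.Str.strip (PySem.Str.join "\n" kept)

-- ===== PORT B =====
-- B's inner while loop: advance past block lines (normalized empty or starting with '-'),
-- stopping (break) at the first non-matching line, which is left unconsumed
def pvConsume : List String → List String
  | [] => []
  | l :: rest => if pvIsBlock l then pvConsume rest else l :: rest

lemma pvConsume_length_le (ls : List String) : (pvConsume ls).length ≤ ls.length := by
  induction ls with
  | nil => simp [pvConsume]
  | cons l rest ih =>
    simp only [pvConsume]
    split
    · exact Nat.le_succ_of_le ih
    · simp

-- B's outer while loop over the line index, as structural recursion on the remaining lines
def pvWalk : List String → List String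
  | [] => []
  | l :: rest =>
    if pvIsHdr l then pvWalk (pvConsume rest)
    else if !pvIsForbidden l then l :: pvWalk rest
    else pvWalk rest
termination_by ls => ls.length
decreasing_by
  · exact Nat.lt_succ_of_le (pvConsume_length_le rest)
  · simp
  · simp

def sanitize_answer_text_py_alt (answer : String) : String :=
  let text := PySem.Str.strip answer
  if PySem.Str.len text == 0 then ""
  else PySem.Str.strip (PySem.Str.join "\n" (pvWalk (PySem.Str.splitlines text)))

-- ===== PRECONDITION & SPEC =====
def Spec_sanitize_answer_text_py (answer : String) (out : String) : Prop := out = sanitize_answer_text_py_alt answer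
instance (answer : String) (out : String) : Decidable (Spec_sanitize_answer_text_py answer out) := by unfold Spec_sanitize_answer_text_py; infer_instance

-- ===== CLAIM (what is proved, stated in full; the proofs are below) =====
def Claim_equal_sanitize_answer_text_py : Prop := ∀ (answer : String), Dom_sanitize_answer_text_py answer → Spec_sanitize_answer_text_py answer (sanitize_answer_text_py answer)

-- ===== LEMMAS AND PROOFS =====

-- a line whose normalized form starts with the precision header is not a block line
lemma pv_hdr_not_block (l : String) (h : pvIsHdr l = true) : pvIsBlock l = false := by
  unfold pvIsHdr at h
  unfold pvIsBlock
  simp only [PySem.Str.startswith_eq, PySem.Str.len_eq] at h ⊢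
  rw [PySem.Chars.startswith_iff] at h
  obtain ⟨t, ht⟩ := h
  have hlist : (pvNorm l).toList =
      't' :: ("o make this recommendation more precise, confirm:".toList ++ t) := by
    rw [← ht]; rfl
  rw [hlist]
  simp [PySem.Chars.startswith, List.isPrefixOf]
  omega

-- the loop invariant: A's fold from (kept, skip) equals kept ++ B's walk of the
-- (block-consumed, if skip) remaining lines
lemma pv_fold_walk (ls : List String) : ∀ kept : List String,
    ((ls.foldl pvStepA (kept, false)).1 = kept ++ pvWalk ls) ∧
    ((ls.foldl pvStepA (kept, true)).1 = kept ++ pvWalk (pvConsume ls)) := by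
  induction ls with
  | nil => intro kept; simp [pvWalk, pvConsume]
  | cons l rest ih =>
    intro kept
    by_cases h1 : pvIsHdr l = true
    · have hblk := pv_hdr_not_block l h1
      refine ⟨?_, ?_⟩
      · simp only [List.foldl_cons, pvStepA, h1, if_true, (ih kept).2, pvWalk]
      · conv_rhs => rw [pvConsume]
        simp only [List.foldl_cons, pvStepA, h1, if_true, (ih kept).2, hblk,
          Bool.false_eq_true, if_false, pvWalk]
    · have h1' : pvIsHdr l = false := by simpa using h1
      by_cases h3 : pvIsForbidden l = true
      · refine ⟨?_, ?_⟩
        · simp only [List.foldl_cons, pvStepA, h1', Bool.false_eq_true, if_false,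
            Bool.false_and, h3, if_true, (ih kept).1]
          conv_rhs => rw [pvWalk]
          simp [h1', h3]
        · by_cases h2 : pvIsBlock l = true
          · conv_rhs => rw [pvConsume]
            simp only [List.foldl_cons, pvStepA, h1', Bool.false_eq_true, if_false,
              Bool.true_and, h2, if_true, (ih kept).2]
          · have h2' : pvIsBlock l = false := by simpa using h2
            conv_rhs => rw [pvConsume]
            simp only [List.foldl_cons, pvStepA, h1', Bool.false_eq_true, if_false,
              Bool.true_and, h2', h3, if_true, (ih kept).1]
            conv_rhs => rw [pvWalk]
            simp [h1', h3]
      · have h3' : pvIsForbidden l = false := by simpa using h3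
        refine ⟨?_, ?_⟩
        · simp only [List.foldl_cons, pvStepA, h1', Bool.false_eq_true, if_false,
            Bool.false_and, h3', (ih (kept ++ [l])).1]
          conv_rhs => rw [pvWalk]
          simp [h1', h3']
        · by_cases h2 : pvIsBlock l = true
          · conv_rhs => rw [pvConsume]
            simp only [List.foldl_cons, pvStepA, h1', Bool.false_eq_true, if_false,
              Bool.true_and, h2, if_true, (ih kept).2]
          · have h2' : pvIsBlock l = false := by simpa using h2
            conv_rhs => rw [pvConsume]
            simp only [List.foldl_cons, pvStepA, h1', Bool.false_eq_true, if_false,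
              Bool.true_and, h2', h3', (ih (kept ++ [l])).1]
            conv_rhs => rw [pvWalk]
            simp [h1', h3']

-- ===== VERDICT (by name: the statement is the Claim_ definition above) =====
theorem sanitize_answer_text_py_spec : Claim_equal_sanitize_answer_text_py := by
  unfold Claim_equal_sanitize_answer_text_py Spec_sanitize_answer_text_py
  intro answer _
  unfold sanitize_answer_text_py sanitize_answer_text_py_alt
  by_cases he : (PySem.Str.len (PySem.Str.strip answer) == 0) = true
  · simp only [he, if_true]
  · have he' : (PySem.Str.len (PySem.Str.strip answer) == 0) = false := by simpa using he
    simp only [he', Bool.false_eq_true, if_false]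
    rw [(pv_fold_walk (PySem.Str.splitlines (PySem.Str.strip answer)) []).1]
    simp
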